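-- pv_equiv track=rewrite | github.com/kindrix/pl-basic-toolkit | worlds.py | add_one_bit
-- ===== SOURCE A (Python) =====
-- def add_one_bit(possibleWorld, reverseAlphabet):
-- 	'''Find next possible world using bit addition.
--
-- 	This is done by adding 1 to the previous world.
--
-- 	Args:
-- 		possibleWorld (dictionary): The previously generated possible world.
-- 		reverseAlphabet (list of chars): The alphabet of the language reversed
-- 											for technical reasons.
--
-- 	Returns:
-- 		dictionary: Next possible world.
--
-- 	'''
--
-- 	borrow = 1 #bit to be added
--
-- 	for key in reverseAlphabet:
-- 		if (not borrow):
-- 			return possibleWorld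
-- 		else:
-- 			if possibleWorld[key] == 1:
-- 				borrow = 1
-- 				possibleWorld[key] = 0
-- 			else:
-- 				borrow = 0
-- 				possibleWorld[key] = 1
-- 	return possibleWorld
-- ===== SOURCE B (Python) =====
-- def add_one_bit(possibleWorld, reverseAlphabet):
-- 	'''Next possible world: clear the run of leading 1-bits and set the bit
-- 	that follows it (binary increment, wrapping when every bit is 1).'''
-- 	n = len(reverseAlphabet)
-- 	run = next((i for i, key in enumerate(reverseAlphabet)
-- 				if possibleWorld[key] != 1), n)
-- 	for key in reverseAlphabet[:run]:
-- 		possibleWorld[key] = 0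
-- 	if run < n:
-- 		possibleWorld[reverseAlphabet[run]] = 1
-- 	return possibleWorld
-- ===== Notes on version B (the rewrite author's own statement) =====
-- stated objective: alternative
-- what changed: Replaces the stateful borrow loop with early return by a two-phase decomposition: a pure scan finds the run of leading 1-bits, then the run is bulk-cleared and the single following bit is set.
-- outside the precondition, e.g. on add_one_bit({'a': 1}, ['a', 'a']): A returns {'a': 1}, B returns {'a': 0}
import Mathlib
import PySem

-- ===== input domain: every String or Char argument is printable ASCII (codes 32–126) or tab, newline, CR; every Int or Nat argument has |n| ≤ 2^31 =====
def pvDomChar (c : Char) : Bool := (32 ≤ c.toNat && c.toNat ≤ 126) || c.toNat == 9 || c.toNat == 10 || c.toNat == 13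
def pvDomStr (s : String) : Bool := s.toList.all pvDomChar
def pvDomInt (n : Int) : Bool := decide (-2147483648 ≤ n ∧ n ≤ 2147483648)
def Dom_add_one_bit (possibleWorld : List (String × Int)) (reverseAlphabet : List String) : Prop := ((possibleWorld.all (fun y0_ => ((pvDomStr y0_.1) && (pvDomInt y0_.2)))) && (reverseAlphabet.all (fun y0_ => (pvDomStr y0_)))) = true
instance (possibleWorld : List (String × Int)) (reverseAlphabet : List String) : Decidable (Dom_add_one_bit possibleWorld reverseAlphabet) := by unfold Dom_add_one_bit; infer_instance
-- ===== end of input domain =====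

-- B replaces A's stateful borrow loop (with early return) by a two-phase decomposition:
-- a pure scan finds the run of leading 1-bits, then that run is bulk-cleared and the
-- single bit after it is set.  Same cost, different structure.
-- Both A and B mutate the dict in place in Python; the theorems here are about the return value.

-- ===== PORT A =====
-- the for-loop over reverseAlphabet, with 'borrow' and the early 'return possibleWorld'
def addOneBitLoop (pw : PySem.Dict String Int) (borrow : Bool) : List String → PySem.Dict String Int
  | [] => pw
  | k :: ks =>
    if !borrow then pw
    else
      match pw.get? k with
      | none => pw   -- Python raises KeyError here; such inputs are outside Pre_
      | some v =>
        if v == 1 then addOneBitLoop (pw.insert k 0) true ks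
        else addOneBitLoop (pw.insert k 1) false ks

def add_one_bit (possibleWorld : List (String × Int)) (reverseAlphabet : List String) : List (String × Int) :=
  (addOneBitLoop (PySem.Dict.ofList possibleWorld) true reverseAlphabet).items

-- ===== PORT B =====
-- Source B's generator 'next((i for i, key in enumerate(ra) if pw[key] != 1), n)':
-- index of the first key whose value is not 1 (n when all are 1).  Where the Python
-- generator raises KeyError on a missing key (outside Pre_), getD reads a non-1 default.
def firstNonOne (pw : PySem.Dict String Int) : List String → Nat
  | [] => 0
  | k :: ks => if pw.getD k 0 == 1 then firstNonOne pw ks + 1 else 0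

def add_one_bit_alt (possibleWorld : List (String × Int)) (reverseAlphabet : List String) : List (String × Int) :=
  let d := PySem.Dict.ofList possibleWorld
  let n := reverseAlphabet.length
  let run := firstNonOne d reverseAlphabet
  -- 'for key in reverseAlphabet[:run]: possibleWorld[key] = 0' (ra[:run] = take run; 0 ≤ run)
  let d2 := (reverseAlphabet.take run).foldl (fun d k => d.insert k 0) d
  -- 'if run < n: possibleWorld[reverseAlphabet[run]] = 1'
  (if h : run < n then d2.insert reverseAlphabet[run] 1 else d2).items

-- ===== PRECONDITION & SPEC =====
-- the prefix of alphabet keys that A's carry actually reads: each scanned key must be present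
-- in the world and not a repetition of an already-scanned key, and the scan continues past a
-- key only while its value is 1
def okScan (d : PySem.Dict String Int) (seen : List String) : List String → Bool
  | [] => true
  | k :: ks =>
    if seen.contains k then false
    else
      match d.get? k with
      | none => false
      | some v => if v == 1 then okScan d (k :: seen) ks else true

-- Pre_ excludes: inputs where A raises KeyError (an alphabet key read by the carry scan is
-- missing from the world), and alphabets that repeat a key inside the scanned prefix (there A
-- re-reads the bit its own carry just cleared while B's scan reads the original value — either
-- result is an accident of iteration).
def Pre_add_one_bit (possibleWorld : List (String × Int)) (reverseAlphabet : List String) : Prop :=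
  okScan (PySem.Dict.ofList possibleWorld) [] reverseAlphabet = true
instance (possibleWorld : List (String × Int)) (reverseAlphabet : List String) : Decidable (Pre_add_one_bit possibleWorld reverseAlphabet) := by unfold Pre_add_one_bit; infer_instance

def pvWitness_add_one_bit : (List (String × Int)) × List String := ([("a", 1), ("b", 0)], ["a", "b"])

def Spec_add_one_bit (possibleWorld : List (String × Int)) (reverseAlphabet : List String) (out : List (String × Int)) : Prop := out = add_one_bit_alt possibleWorld reverseAlphabet
instance (possibleWorld : List (String × Int)) (reverseAlphabet : List String) (out : List (String × Int)) : Decidable (Spec_add_one_bit possibleWorld reverseAlphabet out) := by unfold Spec_add_one_bit; infer_instance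

-- ===== CLAIM (what is proved, stated in full; the proofs are below) =====
def Claim_equal_add_one_bit : Prop := ∀ (possibleWorld : List (String × Int)) (reverseAlphabet : List String), Dom_add_one_bit possibleWorld reverseAlphabet → Pre_add_one_bit possibleWorld reverseAlphabet → Spec_add_one_bit possibleWorld reverseAlphabet (add_one_bit possibleWorld reverseAlphabet)

-- ===== LEMMAS AND PROOFS =====

-- the body of add_one_bit_alt on the dict, for the induction
def bcore (d : PySem.Dict String Int) (ra : List String) : PySem.Dict String Int :=
  if h : firstNonOne d ra < ra.length then
    ((ra.take (firstNonOne d ra)).foldl (fun d k => d.insert k 0) d).insert ra[firstNonOne d ra] 1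
  else
    (ra.take (firstNonOne d ra)).foldl (fun d k => d.insert k 0) d

theorem alt_eq_bcore (possibleWorld : List (String × Int)) (reverseAlphabet : List String) :
    add_one_bit_alt possibleWorld reverseAlphabet
      = (bcore (PySem.Dict.ofList possibleWorld) reverseAlphabet).items := rfl

-- unfolding equations (the definitions are by structural matching)
theorem okScan_cons (d : PySem.Dict String Int) (seen : List String) (k : String)
    (ks : List String) :
    okScan d seen (k :: ks)
      = (if seen.contains k then false
         else match d.get? k with
           | none => false
           | some v => if v == 1 then okScan d (k :: seen) ks else true) := rfl

theorem firstNonOne_cons (d : PySem.Dict String Int) (k : String) (ks : List String) :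
    firstNonOne d (k :: ks)
      = (if d.getD k 0 == 1 then firstNonOne d ks + 1 else 0) := rfl

-- inserting at a key the scan never reads (it is in 'seen') changes neither the scan check …
theorem okScan_insert (d : PySem.Dict String Int) (k : String) (v : Int)
    (seen : List String) (l : List String) (hk : k ∈ seen) :
    okScan (d.insert k v) seen l = okScan d seen l := by
  induction l generalizing seen with
  | nil => rfl
  | cons a t ih =>
    rw [okScan_cons, okScan_cons]
    by_cases hc : a ∈ seen
    · simp [hc]
    · have hca : seen.contains a = false := by simpa using hc
      have hak : a ≠ k := fun e => hc (e ▸ hk)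
      rw [hca, PySem.Dict.get?_insert_of_ne d v hak]
      rcases d.get? a with _ | w
      · rfl
      · rcases hw : (w == 1) with _ | _
        · simp [hw]
        · simp only [hw, if_true]
          exact ih (a :: seen) (List.mem_cons_of_mem a hk)

-- … nor the run of leading ones the scan found
theorem firstNonOne_insert (d : PySem.Dict String Int) (k : String) (v : Int)
    (seen : List String) (l : List String) (hk : k ∈ seen)
    (hok : okScan d seen l = true) :
    firstNonOne (d.insert k v) l = firstNonOne d l := by
  induction l generalizing seen with
  | nil => rfl
  | cons a t ih =>
    rw [okScan_cons] at hok
    by_cases hc : a ∈ seen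
    · simp [hc] at hok
    · have hca : seen.contains a = false := by simpa using hc
      have hak : a ≠ k := fun e => hc (e ▸ hk)
      rw [hca] at hok
      rcases hg : d.get? a with _ | w
      · rw [hg] at hok; simp at hok
      · rw [hg] at hok
        have hgD : d.getD a 0 = w := PySem.Dict.getD_of_get?_eq_some d 0 hg
        rw [firstNonOne_cons, firstNonOne_cons,
            PySem.Dict.getD_insert_of_ne d v 0 hak, hgD]
        by_cases hw : w = 1
        · subst hw
          have hok' : okScan d (a :: seen) t = true := by simpa using hok
          simp [ih (a :: seen) (List.mem_cons_of_mem a hk) hok']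
        · have hwb : (w == 1) = false := by simpa using hw
          rw [hwb]
          simp

-- the loop of A with borrow = false returns immediately
theorem loop_false (pw : PySem.Dict String Int) (l : List String) :
    addOneBitLoop pw false l = pw := by
  cases l <;> rfl

-- the main invariant: A's carry loop equals B's scan/clear/set phases
theorem main_lemma (ra : List String) (seen : List String) (d : PySem.Dict String Int)
    (hok : okScan d seen ra = true) :
    addOneBitLoop d true ra = bcore d ra := by
  induction ra generalizing seen d with
  | nil => rfl
  | cons k t ih =>
    rw [okScan_cons] at hok
    by_cases hc : k ∈ seen
    · simp [hc] at hok
    · have hcb : seen.contains k = false := by simpa using hc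
      rw [hcb] at hok
      rcases hg : d.get? k with _ | v
      · rw [hg] at hok; simp at hok
      · rw [hg] at hok
        have hgD : d.getD k 0 = v := PySem.Dict.getD_of_get?_eq_some d 0 hg
        by_cases hv : v = 1
        · -- a 1-bit: the carry continues; both sides step to d.insert k 0 and t
          subst hv
          have hok' : okScan d (k :: seen) t = true := by simpa using hok
          have hseen : k ∈ k :: seen := List.mem_cons_self ..
          have hA : addOneBitLoop d true (k :: t) = addOneBitLoop (d.insert k 0) true t := by
            show (if !true then d else match d.get? k with
              | none => d
              | some v => if v == 1 then addOneBitLoop (d.insert k 0) true t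
                  else addOneBitLoop (d.insert k 1) false t) = _
            rw [hg]; simp
          rw [hA, ih (k :: seen) (d.insert k 0)
                (by rw [okScan_insert d k 0 _ _ hseen]; exact hok')]
          -- now show bcore (d.insert k 0) t = bcore d (k :: t)
          unfold bcore
          have hrun : firstNonOne d (k :: t) = firstNonOne d t + 1 := by
            rw [firstNonOne_cons, hgD]; simp
          have hrun' : firstNonOne (d.insert k 0) t = firstNonOne d t :=
            firstNonOne_insert d k 0 (k :: seen) t hseen hok'
          rw [hrun, hrun', List.take_succ_cons, List.foldl_cons]
          by_cases hlt : firstNonOne d t < t.length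
          · rw [dif_pos hlt, dif_pos (by simpa using Nat.succ_lt_succ hlt),
                List.getElem_cons_succ]
          · rw [dif_neg hlt, dif_neg (by simpa using fun h => hlt (Nat.lt_of_succ_lt_succ h))]
        · -- not a 1-bit: A sets this key to 1 and stops; B's run is 0
          have hA : addOneBitLoop d true (k :: t) = d.insert k 1 := by
            show (if !true then d else match d.get? k with
              | none => d
              | some v => if v == 1 then addOneBitLoop (d.insert k 0) true t
                  else addOneBitLoop (d.insert k 1) false t) = _
            rw [hg]
            simp [hv, loop_false]
          have hrun : firstNonOne d (k :: t) = 0 := by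
            rw [firstNonOne_cons, hgD]; simp [hv]
          unfold bcore
          rw [hrun, hA, dif_pos (by simp)]
          rfl

-- ===== VERDICT (by name: the statement is the Claim_ definition above) =====
theorem add_one_bit_spec : Claim_equal_add_one_bit := by
  intro possibleWorld reverseAlphabet _hDom hok
  show add_one_bit possibleWorld reverseAlphabet = add_one_bit_alt possibleWorld reverseAlphabet
  rw [alt_eq_bcore]
  unfold add_one_bit
  rw [main_lemma reverseAlphabet [] (PySem.Dict.ofList possibleWorld) hok]
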